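-- pv_equiv track=rewrite | github.com/Jlobblet/px150 | Week 3/Exercises/10.py | nearest_neighbours
-- ===== SOURCE A (Python) =====
-- def nearest_neighbours(inte):
--     if inte < 1:
--         return
--     r = list(())
--     i = 0
--     while i <= inte:
--         if i % 2 == 1:
--             r.append(i)
--             if (i+1) == inte:
--                 break
--         i += 1
--     R = list(())
--     for i in r:
--         R.append(list((i-1,i+1)))
--     return R
-- ===== SOURCE B (Python) =====
-- def nearest_neighbours(inte):
--     if inte < 1:
--         return
--     n = (inte + 1) // 2
--     return [[2 * k, 2 * k + 2] for k in range(n)]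
-- ===== Notes on version B (the rewrite author's own statement) =====
-- stated objective: faster
-- what changed: B computes the number of output pairs in closed form and emits each pair directly from its index in one list comprehension, instead of A's while-loop scan of every integer with a parity test building an odds list followed by a second mapping pass.
import Mathlib
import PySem

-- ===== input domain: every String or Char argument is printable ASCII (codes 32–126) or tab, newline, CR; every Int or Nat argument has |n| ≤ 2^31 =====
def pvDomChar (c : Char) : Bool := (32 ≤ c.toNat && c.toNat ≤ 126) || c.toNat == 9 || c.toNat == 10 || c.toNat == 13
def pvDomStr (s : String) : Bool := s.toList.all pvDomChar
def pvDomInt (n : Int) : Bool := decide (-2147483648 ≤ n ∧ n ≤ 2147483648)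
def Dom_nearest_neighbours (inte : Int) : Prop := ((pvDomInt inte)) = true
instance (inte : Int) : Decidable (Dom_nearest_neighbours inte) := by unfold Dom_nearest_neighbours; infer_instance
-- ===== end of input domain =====

-- B builds each pair [2k, 2k+2] directly from its index instead of A's scan-and-filter; return values proved equal for every Int input.

-- ===== PORT A =====
-- A's while loop: state (i, r); break when (i+1) == inte inside the odd branch.
def nnLoopA (inte i : Int) (r : List Int) : List Int :=
  if h : i ≤ inte then
    if i % 2 = 1 then
      if i + 1 = inte then r ++ [i]
      else nnLoopA inte (i + 1) (r ++ [i])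
    else nnLoopA inte (i + 1) r
  else r
termination_by (inte + 1 - i).toNat
decreasing_by all_goals omega

def nearest_neighbours (inte : Int) : Option (List (List Int)) :=
  if inte < 1 then none
  else
    let r := nnLoopA inte 0 []
    some (r.map (fun i => [i - 1, i + 1]))

-- ===== PORT B =====
def nearest_neighbours_alt (inte : Int) : Option (List (List Int)) :=
  if inte < 1 then none
  else
    let n := PySem.Int.floordiv (inte + 1) 2
    some ((PySem.List.pyRange 0 n 1).map (fun k => [2 * k, 2 * k + 2]))

-- ===== PRECONDITION & SPEC =====
def Spec_nearest_neighbours (inte : Int) (out : Option (List (List Int))) : Prop := out = nearest_neighbours_alt inte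
instance (inte : Int) (out : Option (List (List Int))) : Decidable (Spec_nearest_neighbours inte out) := by unfold Spec_nearest_neighbours; infer_instance

-- ===== CLAIM (what is proved, stated in full; the proofs are below) =====
def Claim_equal_nearest_neighbours : Prop := ∀ (inte : Int), Dom_nearest_neighbours inte → Spec_nearest_neighbours inte (nearest_neighbours inte)

-- ===== LEMMAS AND PROOFS =====

-- A's loop, started at an even index 2k, appends exactly the odd numbers 2(k+j)+1 below (inte+1)/2 pairs' bound.
theorem nnLoopA_eq (t : Nat) : ∀ (k inte : Int) (r : List Int), 0 ≤ k → (inte + 1 - 2 * k).toNat ≤ t →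
    nnLoopA inte (2 * k) r = r ++ (List.range ((inte + 1) / 2 - k).toNat).map (fun (j : Nat) => 2 * (k + (j : Int)) + 1) := by
  induction t with
  | zero =>
    intro k inte r hk ht
    have h1 : ¬ (2 * k ≤ inte) := by omega
    have h2 : ((inte + 1) / 2 - k).toNat = 0 := by omega
    rw [nnLoopA]
    simp [h1, h2]
  | succ t ih =>
    intro k inte r hk ht
    by_cases h1 : 2 * k ≤ inte
    · rw [nnLoopA]
      have heven : ¬ ((2 * k) % 2 = 1) := by omega
      simp only [h1, dif_pos, heven, if_false]
      rw [nnLoopA]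
      by_cases h2 : 2 * k + 1 ≤ inte
      · have hodd : (2 * k + 1) % 2 = 1 := by omega
        have hm : ((inte + 1) / 2 - k).toNat = (((inte + 1) / 2 - (k + 1)).toNat) + 1 := by omega
        rw [hm, List.range_succ_eq_map]
        by_cases h3 : 2 * k + 1 + 1 = inte
        · have h4 : ((inte + 1) / 2 - (k + 1)).toNat = 0 := by omega
          simp [h2, hodd, h3, h4]
        · have hrec : nnLoopA inte (2 * k + 1 + 1) (r ++ [2 * k + 1])
              = (r ++ [2 * k + 1]) ++ (List.range ((inte + 1) / 2 - (k + 1)).toNat).map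
                  (fun (j : Nat) => 2 * ((k + 1) + (j : Int)) + 1) := by
            have := ih (k + 1) inte (r ++ [2 * k + 1]) (by omega) (by omega)
            have harg : 2 * (k + 1) = 2 * k + 1 + 1 := by ring
            rwa [harg] at this
          simp only [h2, dif_pos, hodd, h3, if_false, if_pos, hrec]
          simp only [List.map_cons, List.map_map, List.append_assoc, List.cons_append,
            List.nil_append, List.append_cancel_left_eq]
          refine List.cons_eq_cons.mpr ⟨by push_cast; ring, ?_⟩
          apply List.map_congr_left
          intro j _
          simp only [Function.comp]
          push_cast; ring
      · have hinte : inte = 2 * k := by omega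
        have hodd : (2 * k + 1) % 2 = 1 := by omega
        have hm : ((inte + 1) / 2 - k).toNat = 0 := by omega
        simp [h2, hm]
    · have h2 : ((inte + 1) / 2 - k).toNat = 0 := by omega
      rw [nnLoopA]
      simp [h1, h2]

-- ===== VERDICT (by name: the statement is the Claim_ definition above) =====
theorem nearest_neighbours_spec : Claim_equal_nearest_neighbours := by
  intro inte _
  unfold Spec_nearest_neighbours nearest_neighbours nearest_neighbours_alt
  by_cases hlt : inte < 1
  · simp [hlt]
  · simp only [hlt, if_false]
    have hloop := nnLoopA_eq (inte + 1).toNat 0 inte [] (by omega) (by omega)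
    simp only [mul_zero] at hloop
    rw [hloop]
    have hfd : PySem.Int.floordiv (inte + 1) 2 = (inte + 1) / 2 := by
      simp [PySem.Int.floordiv, Int.fdiv_eq_ediv]
    rw [hfd, PySem.List.pyRange_one]
    simp only [List.nil_append, List.map_map, sub_zero, Option.some_inj]
    apply List.map_congr_left
    intro j _
    simp only [Function.comp, List.cons.injEq, and_true]
    exact ⟨by ring, by ring⟩
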